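-- pv_equiv track=rewrite | github.com/szzd7223/dsa-related-sandbox | max_cyclic_arr.py | maxCyclicArr
-- ===== SOURCE A (Python) =====
-- def maxCyclicArr(arr):
--     max_sum = 0
--     n = len(arr)
--
--
--     for start in range(n):
--         res = []
--         for i in range(n):
--             res.append(arr[(start+i) % n])
--         xor = 0
--         total = 0
--         for num in res:
--             xor = xor ^ num
--             total += xor
--
--         max_sum = max(max_sum, total)
--
--         res = []
--         for i in range(n):
--             res.append(arr[(start-i) % n])
--         xor = 0
--         total = 0
--         for num in res:
--             xor = xor ^ num
--             total += xor
--
--         max_sum =  max(max_sum, total)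
--
--     return max_sum
-- ===== SOURCE B (Python) =====
-- def maxCyclicArr(arr):
--     # Per-bit parity counting: each rotation's total is reassembled from per-bit
--     # difference counts read off cumulative bit-count prefix arrays over the
--     # doubled array (33 two's-complement bits suffice for |x| <= 2**31), so no
--     # per-rotation re-scan is needed; backward rotations are forward rotations
--     # of the reversed array.
--     def best(xs):
--         n = len(xs)
--         q = 0
--         px = [0]
--         for v in xs + xs:
--             q = q ^ v
--             px.append(q)
--         totals = [0] * n
--         cur = px          # cur[k] == px[k] // 2**b at the start of iteration b
--         w = 1             # two's-complement weight of bit b (negative sign bit)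
--         for b in range(33):
--             if b == 32:
--                 w = -w
--             cum = [0]
--             c = 0
--             for k in range(1, 2 * n + 1):
--                 c = c + cur[k] % 2
--                 cum.append(c)
--             new_totals = []
--             for s in range(n):
--                 ones = cum[s + n] - cum[s]
--                 if cur[s] % 2:
--                     ones = n - ones
--                 new_totals.append(totals[s] + w * ones)
--             totals = new_totals
--             cur = [z // 2 for z in cur]
--             w = w * 2
--         best_t = 0
--         for t in totals:
--             best_t = max(best_t, t)
--         return best_t
--     return max(best(arr), best(arr[::-1]))
-- ===== Notes on version B (the rewrite author's own statement) =====
-- stated objective: faster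
-- what changed: B replaces A's per-rotation rebuild-and-rescan by per-bit parity counting: prefix XORs of the doubled array, cumulative set-bit counts per two's-complement bit (33 bits cover |x|<=2^31), each rotation's total reassembled in O(bits) from windowed bit counts; backward rotations become forward rotations of the reversed array.
import Mathlib
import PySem

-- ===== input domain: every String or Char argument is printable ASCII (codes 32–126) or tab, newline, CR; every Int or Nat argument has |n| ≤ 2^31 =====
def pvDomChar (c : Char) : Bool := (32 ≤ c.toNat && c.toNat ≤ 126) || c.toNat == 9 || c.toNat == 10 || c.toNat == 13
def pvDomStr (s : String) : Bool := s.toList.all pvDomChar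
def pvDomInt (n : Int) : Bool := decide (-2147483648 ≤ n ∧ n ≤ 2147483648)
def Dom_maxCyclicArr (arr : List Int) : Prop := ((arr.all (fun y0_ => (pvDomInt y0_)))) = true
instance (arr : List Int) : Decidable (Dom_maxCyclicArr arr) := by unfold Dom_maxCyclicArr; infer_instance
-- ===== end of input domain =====

-- B replaces A's per-rotation rebuild-and-rescan by per-bit parity counting over
-- cumulative bit-count prefix arrays of the doubled array (33 two's-complement bits
-- cover the domain |x| ≤ 2^31); backward rotations become forward rotations of the
-- reversed array. Measurably faster on large inputs.

-- ===== PORT A =====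
-- literal transliteration of A; arr[(start±i) % n] is always in range (0 ≤ mod < n), so
-- pyGetD's default 0 is never used
def maxCyclicArr (arr : List Int) : Int :=
  let n : Int := arr.length
  (PySem.List.pyRange 0 n).foldl (fun max_sum start =>
    let res : List Int := (PySem.List.pyRange 0 n).foldl
      (fun r i => r ++ [PySem.List.pyGetD arr (PySem.Int.mod (start + i) n) 0]) []
    let p := res.foldl (fun (st : Int × Int) num =>
      (PySem.Int.bxor st.1 num, st.2 + PySem.Int.bxor st.1 num)) (0, 0)
    let max_sum1 := max max_sum p.2
    let res2 : List Int := (PySem.List.pyRange 0 n).foldl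
      (fun r i => r ++ [PySem.List.pyGetD arr (PySem.Int.mod (start - i) n) 0]) []
    let q := res2.foldl (fun (st : Int × Int) num =>
      (PySem.Int.bxor st.1 num, st.2 + PySem.Int.bxor st.1 num)) (0, 0)
    max max_sum1 q.2) 0

-- ===== PORT B =====
-- transliteration of Source B's helper best(xs); all list indices are in range, so pyGetD's
-- default 0 is never used
def pvBest (xs : List Int) : Int :=
  let n : Int := xs.length
  let px : List Int := ((xs ++ xs).foldl
    (fun (p : List Int × Int) v => (p.1 ++ [PySem.Int.bxor p.2 v], PySem.Int.bxor p.2 v))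
    ([0], 0)).1
  let fin := (PySem.List.pyRange 0 33).foldl
    (fun (st : List Int × List Int × Int) b =>
      let totals := st.1
      let cur := st.2.1
      let w0 := st.2.2
      let w : Int := if b == 32 then -w0 else w0
      let cum : List Int := ((PySem.List.pyRange 1 (2*n+1)).foldl
        (fun (p : List Int × Int) k =>
          (p.1 ++ [p.2 + PySem.Int.mod (PySem.List.pyGetD cur k 0) 2],
           p.2 + PySem.Int.mod (PySem.List.pyGetD cur k 0) 2)) ([0], 0)).1
      let new_totals : List Int := (PySem.List.pyRange 0 n).foldl
        (fun acc s =>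
          let ones := PySem.List.pyGetD cum (s + n) 0 - PySem.List.pyGetD cum s 0
          let ones2 := if PySem.Int.mod (PySem.List.pyGetD cur s 0) 2 ≠ 0 then n - ones else ones
          acc ++ [PySem.List.pyGetD totals s 0 + w * ones2]) []
      (new_totals, cur.map (fun z => PySem.Int.floordiv z 2), w * 2))
    (List.replicate xs.length (0 : Int), px, 1)
  fin.1.foldl (fun best_t t => max best_t t) 0

def maxCyclicArr_alt (arr : List Int) : Int :=
  max (pvBest arr) (pvBest arr.reverse)

-- ===== PRECONDITION & SPEC =====
def Spec_maxCyclicArr (arr : List Int) (out : Int) : Prop := out = maxCyclicArr_alt arr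
instance (arr : List Int) (out : Int) : Decidable (Spec_maxCyclicArr arr out) := by unfold Spec_maxCyclicArr; infer_instance

-- ===== CLAIM (what is proved, stated in full; the proofs are below) =====
def Claim_equal_maxCyclicArr : Prop := ∀ (arr : List Int), Dom_maxCyclicArr arr → Spec_maxCyclicArr arr (maxCyclicArr arr)

-- ===== LEMMAS AND PROOFS =====

theorem bxor_neg_nonneg (m n : Nat) : PySem.Int.bxor (Int.negSucc m) (Int.ofNat n) = Int.negSucc (m ^^^ n) := by
  simp [PySem.Int.bxor, Int.negSucc_eq]
  rw [if_neg (by omega)]; omega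
theorem bxor_nonneg_neg (m n : Nat) : PySem.Int.bxor (Int.ofNat m) (Int.negSucc n) = Int.negSucc (m ^^^ n) := by
  simp [PySem.Int.bxor, Int.negSucc_eq]
  rw [if_neg (by omega : ¬ ((n:Int) ≤ -1))]; omega
theorem bxor_neg_neg (m n : Nat) : PySem.Int.bxor (Int.negSucc m) (Int.negSucc n) = Int.ofNat (m ^^^ n) := by
  simp [PySem.Int.bxor, Int.negSucc_eq]
  rw [if_neg (by omega), if_neg (by omega : ¬ ((n:Int) ≤ -1))]
theorem bxor_nn (m n : Nat) : PySem.Int.bxor (Int.ofNat m) (Int.ofNat n) = Int.ofNat (m ^^^ n) := by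
  simp [PySem.Int.bxor_natCast]

theorem pv_zero_bxor (a : Int) : PySem.Int.bxor 0 a = a := by
  rw [PySem.Int.bxor_comm]; exact PySem.Int.bxor_zero a
theorem pv_bxor_assoc (a b c : Int) :
    PySem.Int.bxor (PySem.Int.bxor a b) c = PySem.Int.bxor a (PySem.Int.bxor b c) := by
  rcases a with m | m <;> rcases b with n | n <;> rcases c with p | p <;>
    simp only [bxor_nn, bxor_neg_nonneg, bxor_nonneg_neg, bxor_neg_neg, Nat.xor_assoc]
theorem pv_bxor_cancel (b c : Int) : PySem.Int.bxor (PySem.Int.bxor b c) b = c := by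
  rw [PySem.Int.bxor_comm b c, pv_bxor_assoc, PySem.Int.bxor_self, PySem.Int.bxor_zero]

def pvXF (x : Int) (l : List Int) : Int := l.foldl PySem.Int.bxor x
theorem pvXF_shift (l : List Int) : ∀ x, pvXF x l = PySem.Int.bxor x (pvXF 0 l) := by
  induction l with
  | nil => intro x; simp [pvXF, PySem.Int.bxor_zero]
  | cons v l ih =>
    intro x
    simp only [pvXF, List.foldl_cons] at *
    rw [ih (PySem.Int.bxor x v), ih (PySem.Int.bxor 0 v), pv_zero_bxor, pv_bxor_assoc]

def pvPS (x : Int) : List Int → Int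
  | [] => 0
  | v :: ys => PySem.Int.bxor x v + pvPS (PySem.Int.bxor x v) ys
theorem pv_innerA (ys : List Int) : ∀ x t,
    (ys.foldl (fun (st : Int × Int) num =>
      (PySem.Int.bxor st.1 num, st.2 + PySem.Int.bxor st.1 num)) (x, t)).2 = t + pvPS x ys := by
  induction ys with
  | nil => intro x t; simp [pvPS]
  | cons v ys ih => intro x t; simp only [List.foldl_cons, pvPS]; rw [ih]; ring
theorem pvPS_sum (ys : List Int) : ∀ x,
    pvPS x ys = ((List.range ys.length).map
      (fun j => PySem.Int.bxor x (pvXF 0 (ys.take (j + 1))))).sum := by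
  induction ys with
  | nil => intro x; simp [pvPS]
  | cons v ys ih =>
    intro x
    simp only [pvPS, List.length_cons, List.range_succ_eq_map, List.map_cons, List.map_map,
      List.sum_cons, List.take_succ_cons]
    rw [ih (PySem.Int.bxor x v)]
    congr 1
    · simp [pvXF, pv_zero_bxor]
    · congr 1
      apply List.map_congr_left
      intro j hj
      simp only [Function.comp_apply]
      have h1 : pvXF 0 (v :: List.take j.succ ys) = PySem.Int.bxor v (pvXF 0 (List.take (j+1) ys)) := by
        simp only [pvXF, List.foldl_cons, pv_zero_bxor]
        exact pvXF_shift _ v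
      rw [h1, ← pv_bxor_assoc]

def pvPre (x : Int) : List Int → List Int
  | [] => [x]
  | v :: ws => x :: pvPre (PySem.Int.bxor x v) ws
theorem pvPre_build (ws : List Int) : ∀ (acc : List Int) x,
    ((ws.foldl (fun (p : List Int × Int) v =>
      (p.1 ++ [PySem.Int.bxor p.2 v], PySem.Int.bxor p.2 v)) (acc ++ [x], x)).1) = acc ++ pvPre x ws := by
  induction ws with
  | nil => intro acc x; simp [pvPre]
  | cons v ws ih =>
    intro acc x
    simp only [List.foldl_cons, pvPre]
    rw [show acc ++ [x] ++ [PySem.Int.bxor x v] = (acc ++ [x]) ++ [PySem.Int.bxor x v] from rfl,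
        ih (acc ++ [x]) (PySem.Int.bxor x v)]
    simp
theorem pvPre_getD (ws : List Int) : ∀ (x : Int) (k : Nat), k ≤ ws.length →
    (pvPre x ws).getD k 0 = pvXF x (ws.take k) := by
  induction ws with
  | nil =>
    intro x k hk
    have : k = 0 := by simpa using hk
    subst this; simp [pvPre, pvXF]
  | cons v ws ih =>
    intro x k hk
    cases k with
    | zero => simp [pvPre, pvXF]
    | succ k =>
      simp only [pvPre, List.getD_cons_succ, List.take_succ_cons]
      rw [ih (PySem.Int.bxor x v) k (by simpa using hk)]
      simp [pvXF]
theorem pvPre_length (ws : List Int) : ∀ x, (pvPre x ws).length = ws.length + 1 := by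
  induction ws with
  | nil => intro x; simp [pvPre]
  | cons v ws ih => intro x; simp [pvPre, ih]

theorem pv_foldmax_shift {β : Type} (l : List β) (g : β → Int) :
    ∀ a b, l.foldl (fun m s => max m (g s)) (max a b) = max a (l.foldl (fun m s => max m (g s)) b) := by
  induction l with
  | nil => intro a b; rfl
  | cons x l ih =>
    intro a b
    simp only [List.foldl_cons]
    rw [max_assoc, ih]
theorem pv_foldl_max_shift (L : List Int) : ∀ a b : Int, L.foldl max (max a b) = max a (L.foldl max b) := by
  induction L with
  | nil => intro a b; rfl
  | cons x L ih => intro a b; simp only [List.foldl_cons]; rw [max_assoc, ih]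
theorem pv_foldmax_reverse (L : List Int) : ∀ a : Int, L.reverse.foldl max a = L.foldl max a := by
  induction L with
  | nil => intro a; rfl
  | cons x L ih =>
    intro a
    simp only [List.reverse_cons, List.foldl_append, List.foldl_cons, List.foldl_nil, ih]
    rw [max_comm a x, pv_foldl_max_shift]
    exact max_comm _ _
theorem pv_foldmax_split {β : Type} (l : List β) (f h : β → Int) :
    ∀ a, l.foldl (fun m s => max (max m (f s)) (h s)) a
      = max (l.foldl (fun m s => max m (f s)) a) (l.foldl (fun m s => max m (h s)) a) := by
  induction l with
  | nil => intro a; exact (max_self a).symm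
  | cons x l ih =>
    intro a
    simp only [List.foldl_cons]
    rw [ih]
    have e1 : l.foldl (fun m s => max m (f s)) (max (max a (f x)) (h x))
        = max (h x) (l.foldl (fun m s => max m (f s)) (max a (f x))) := by
      rw [max_comm (max a (f x)) (h x)]; exact pv_foldmax_shift l f (h x) (max a (f x))
    have e2 : l.foldl (fun m s => max m (h s)) (max (max a (f x)) (h x))
        = max (f x) (l.foldl (fun m s => max m (h s)) (max a (h x))) := by
      rw [show max (max a (f x)) (h x) = max (f x) (max a (h x)) from by
        rw [max_comm a (f x), max_assoc]]
      exact pv_foldmax_shift l h (f x) (max a (h x))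
    rw [e1, e2, max_max_max_comm]
    apply max_eq_right
    apply max_le
    · refine le_trans (le_max_right a (h x)) ?_
      refine le_trans ?_ (le_max_right _ _)
      rw [← List.foldl_map]
      exact (PySem.List.le_foldl_max (l.map h) (max a (h x))).1
    · refine le_trans (le_max_right a (f x)) ?_
      refine le_trans ?_ (le_max_left _ _)
      rw [← List.foldl_map]
      exact (PySem.List.le_foldl_max (l.map f) (max a (f x))).1

theorem pv_pyRange_shift (m : Nat) (a : Int) :
    PySem.List.pyRange a (a + (m : Int)) = (List.range m).map (fun j : Nat => a + (j : Int)) := by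
  induction m with
  | zero =>
    simp only [Nat.cast_zero, add_zero, List.range_zero, List.map_nil]
    refine List.eq_nil_iff_forall_not_mem.mpr ?_
    intro x hx
    rw [PySem.List.mem_pyRange_one] at hx
    omega
  | succ m ih =>
    rw [show a + ((m+1 : Nat) : Int) = (a + (m : Int)) + 1 from by push_cast; ring,
        PySem.List.pyRange_one_succ_right (by omega), ih, List.range_succ, List.map_append]
    simp
theorem pv_range_rev (N : Nat) :
    (List.range N).map (fun s => N - 1 - s) = (List.range N).reverse := by
  apply List.ext_getElem
  · simp
  · intro i h1 h2
    simp only [List.getElem_map, List.getElem_range, List.getElem_reverse]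
    simp only [List.length_map, List.length_range] at h1
    simp

def pvRot (xs : List Int) (s : Nat) : List Int := xs.drop s ++ xs.take s
theorem pvRot_length (xs : List Int) (s : Nat) : (pvRot xs s).length = xs.length := by
  simp [pvRot]; omega
theorem pv_seg (xs : List Int) (s j : Nat) (hs : s ≤ xs.length) (hj : j ≤ xs.length) :
    (List.drop s (xs ++ xs)).take j = (pvRot xs s).take j := by
  unfold pvRot
  rw [List.drop_append_of_le_length hs, List.take_append, List.take_append, List.take_take]
  congr 1
  rw [Nat.min_eq_left (by simp [List.length_drop]; omega)]
theorem pv_resF (arr : List Int) (s : Nat) (hs : s < arr.length) :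
    ((List.range arr.length).map
      (fun i : Nat => PySem.List.pyGetD arr (PySem.Int.mod ((s : Int) + (i : Int)) (arr.length : Int)) 0))
      = pvRot arr s := by
  apply List.ext_getElem
  · simp [pvRot_length]
  · intro i h1 h2
    simp only [List.length_map, List.length_range] at h1
    simp only [List.getElem_map, List.getElem_range]
    have hNpos : 0 < arr.length := by omega
    rw [show ((s:Int) + (i:Int)) = ((s+i : Nat) : Int) from by push_cast; ring,
        PySem.Int.mod_natCast, PySem.List.pyGetD_natCast,
        List.getD_eq_getElem _ _ (Nat.mod_lt _ hNpos)]
    simp only [pvRot, List.getElem_append, List.length_drop]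
    split_ifs with hc
    · rw [List.getElem_drop]
      have hm : (s + i) % arr.length = s + i := Nat.mod_eq_of_lt (by omega)
      simp [hm]
    · rw [List.getElem_take]
      have hm : (s + i) % arr.length = i - (arr.length - s) := by
        rw [Nat.mod_eq_sub_mod (by omega), Nat.mod_eq_of_lt (by omega)]
        omega
      simp [hm]
theorem pv_resB (arr : List Int) (s : Nat) (hs : s < arr.length) :
    ((List.range arr.length).map
      (fun i : Nat => PySem.List.pyGetD arr (PySem.Int.mod ((s : Int) - (i : Int)) (arr.length : Int)) 0))
      = pvRot arr.reverse (arr.length - 1 - s) := by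
  apply List.ext_getElem
  · simp [pvRot_length]
  · intro i h1 h2
    simp only [List.length_map, List.length_range] at h1
    simp only [List.getElem_map, List.getElem_range]
    have hNpos : 0 < arr.length := by omega
    have hmod : PySem.Int.mod ((s : Int) - (i : Int)) (arr.length : Int)
        = (((s + arr.length - i) % arr.length : Nat) : Int) := by
      rw [PySem.Int.mod_eq_emod_of_pos (by exact_mod_cast hNpos),
          show (s:Int) - i = ((s + arr.length - i : Nat) : Int) - (arr.length : Int) from by
            push_cast [Nat.cast_sub (by omega : i ≤ s + arr.length)]; ring,
          Int.sub_emod_right]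
      push_cast
      rfl
    rw [hmod, PySem.List.pyGetD_natCast, List.getD_eq_getElem _ _ (Nat.mod_lt _ hNpos)]
    simp only [pvRot, List.getElem_append, List.length_drop, List.length_reverse]
    split_ifs with hc
    · rw [List.getElem_drop, List.getElem_reverse]
      have hm : (s + arr.length - i) % arr.length = s - i := by
        rw [show s + arr.length - i = (s - i) + arr.length from by omega,
            Nat.add_mod_right, Nat.mod_eq_of_lt (by omega)]
      simp only [hm]
      congr 1
      omega
    · rw [List.getElem_take, List.getElem_reverse]
      have hm : (s + arr.length - i) % arr.length = s + arr.length - i := by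
        rw [Nat.mod_eq_of_lt (by omega)]
      simp only [hm]
      congr 1
      omega
theorem pvA_char (arr : List Int) :
    maxCyclicArr arr = (List.range arr.length).foldl
      (fun m s => max (max m (pvPS 0 (pvRot arr s))) (pvPS 0 (pvRot arr.reverse (arr.length - 1 - s)))) 0 := by
  simp only [maxCyclicArr]
  rw [PySem.List.pyRange_zero_natCast, List.foldl_map]
  apply PySem.List.foldl_congr_mem
  intro acc s hs
  rw [List.mem_range] at hs
  simp only [PySem.List.foldl_append_singleton_eq_map, List.nil_append, List.map_map,
    Function.comp_def]
  rw [pv_resF arr s hs, pv_resB arr s hs, pv_innerA, pv_innerA, zero_add, zero_add]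

-- prefix-xor view of one rotation's total
def pvQ (xs : List Int) (k : Nat) : Int := pvXF 0 ((xs ++ xs).take k)

theorem pv_window (xs : List Int) (s : Nat) (hs : s < xs.length) :
    pvPS 0 (pvRot xs s) = ((List.range xs.length).map
      (fun j => PySem.Int.bxor (pvQ xs (s + (j + 1))) (pvQ xs s))).sum := by
  rw [pvPS_sum, pvRot_length]
  apply congrArg
  apply List.map_congr_left
  intro j hj
  rw [List.mem_range] at hj
  rw [pv_zero_bxor]
  have hsplit : pvXF 0 (List.take s (xs ++ xs) ++ List.take (j+1) (List.drop s (xs ++ xs)))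
      = PySem.Int.bxor (pvXF 0 (List.take s (xs ++ xs)))
          (pvXF 0 (List.take (j+1) (List.drop s (xs ++ xs)))) := by
    simp only [pvXF, List.foldl_append]
    exact pvXF_shift _ _
  have hQ : pvQ xs (s + (j+1)) = PySem.Int.bxor (pvQ xs s)
      (pvXF 0 (List.take (j+1) (List.drop s (xs ++ xs)))) := by
    unfold pvQ
    rw [List.take_add, hsplit]
  rw [hQ, pv_bxor_cancel, pv_seg xs s (j+1) hs.le (by omega)]

-- generic sum helpers
theorem pv_sum_add (l : List Nat) (u v : Nat → Int) :
    (l.map (fun j => u j + v j)).sum = (l.map u).sum + (l.map v).sum := by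
  induction l with
  | nil => simp
  | cons a l ih => simp only [List.map_cons, List.sum_cons, ih]; ring
theorem pv_sum_sub (l : List Nat) (u v : Nat → Int) :
    (l.map (fun j => u j - v j)).sum = (l.map u).sum - (l.map v).sum := by
  induction l with
  | nil => simp
  | cons a l ih => simp only [List.map_cons, List.sum_cons, ih]; ring
theorem pv_mul_sum (c : Int) (l : List Nat) (u : Nat → Int) :
    c * (l.map u).sum = (l.map (fun j => c * u j)).sum := by
  induction l with
  | nil => simp
  | cons a l ih => simp only [List.map_cons, List.sum_cons, ← ih]; ring
theorem pv_sum_one (m : Nat) : ((List.range m).map (fun _ => (1:Int))).sum = (m : Int) := by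
  induction m with
  | zero => simp
  | succ m ih =>
    rw [List.range_succ, List.map_append, List.sum_append, ih]
    push_cast
    simp
theorem pv_sum_swap (A B : Nat) (g : Nat → Nat → Int) :
    ((List.range A).map (fun b => ((List.range B).map (fun j => g b j)).sum)).sum
      = ((List.range B).map (fun j => ((List.range A).map (fun b => g b j)).sum)).sum := by
  induction A with
  | zero => simp
  | succ A ih =>
    have h2 : ((List.range B).map (fun j => ((List.range (A+1)).map (fun b => g b j)).sum))
        = (List.range B).map (fun j => ((List.range A).map (fun b => g b j)).sum + g A j) := by
      apply List.map_congr_left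
      intro j _
      rw [List.range_succ, List.map_append, List.sum_append]
      simp
    rw [h2, pv_sum_add, ← ih, List.range_succ, List.map_append, List.sum_append]
    simp

-- two's-complement bits
def pvBitI (z : Int) (b : Nat) : Int := z / 2^b % 2
def pvEff (b : Nat) : Int := if b = 32 then -(2^32) else 2^b
def pvTermJ (xs : List Int) (s j b : Nat) : Int :=
  pvBitI (pvQ xs (s + (j+1))) b + pvBitI (pvQ xs s) b
    - 2 * (pvBitI (pvQ xs (s + (j+1))) b * pvBitI (pvQ xs s) b)
def pvRow (xs : List Int) (b s : Nat) : Int :=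
  ((List.range xs.length).map (fun j => pvTermJ xs s j b)).sum
def pvT (xs : List Int) (bnd s : Nat) : Int :=
  ((List.range bnd).map (fun b => pvEff b * pvRow xs b s)).sum
def pvSc (xs : List Int) (b k : Nat) : Int :=
  ((List.range k).map (fun j => pvBitI (pvQ xs (j+1)) b)).sum

theorem pvBitI_cases (z : Int) (b : Nat) : pvBitI z b = 0 ∨ pvBitI z b = 1 := by
  unfold pvBitI
  generalize z / 2^b = q
  omega
theorem pv_cast_mod2 (q : Nat) : ((q % 2 : Nat) : Int) = (q : Int) % 2 := by omega
theorem pvBitI_natCast (m b : Nat) : pvBitI (Int.ofNat m) b = ((m / 2^b % 2 : Nat) : Int) := by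
  unfold pvBitI
  rw [show ((2:Int)^b) = ((2^b : Nat) : Int) from by push_cast; rfl]
  rw [Int.ofNat_eq_natCast, ← Int.natCast_ediv, pv_cast_mod2]
theorem pvBitI_negSucc (m b : Nat) : pvBitI (Int.negSucc m) b = 1 - ((m / 2^b % 2 : Nat) : Int) := by
  unfold pvBitI
  rw [show ((2:Int)^b) = ((2^b : Nat) : Int) from by push_cast; rfl]
  rw [Int.negSucc_ediv m (by positivity)]
  have hA : Int.ediv (m : Int) ((2^b : Nat) : Int) = ((m / 2^b : Nat) : Int) := by
    rw [show Int.ediv (m : Int) ((2^b : Nat) : Int) = (m : Int) / ((2^b : Nat) : Int) from rfl,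
        ← Int.natCast_ediv]
  rw [hA, pv_cast_mod2]
  generalize ((m / 2^b : Nat) : Int) = A
  have : 0 ≤ A % 2 ∧ A % 2 < 2 := ⟨Int.emod_nonneg A (by norm_num), Int.emod_lt_of_pos A (by norm_num)⟩
  omega
theorem pv_natbit_xor (m n b : Nat) :
    (m ^^^ n) / 2^b % 2 = (m / 2^b % 2 + n / 2^b % 2) % 2 := by
  have hx : (m ^^^ n).testBit b = ((m.testBit b) ^^ (n.testBit b)) := Nat.testBit_xor m n b
  rw [Nat.testBit_eq_decide_div_mod_eq, Nat.testBit_eq_decide_div_mod_eq,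
      Nat.testBit_eq_decide_div_mod_eq] at hx
  have h1 : m / 2^b % 2 < 2 := Nat.mod_lt _ (by norm_num)
  have h2 : n / 2^b % 2 < 2 := Nat.mod_lt _ (by norm_num)
  have h3 : (m ^^^ n) / 2^b % 2 < 2 := Nat.mod_lt _ (by norm_num)
  have e1 : m / 2^b % 2 = 0 ∨ m / 2^b % 2 = 1 := by omega
  have e2 : n / 2^b % 2 = 0 ∨ n / 2^b % 2 = 1 := by omega
  rcases e1 with h | h <;> rcases e2 with h' | h' <;>
    simp [h, h'] at hx ⊢ <;> omega
theorem pvBitI_bxor (x y : Int) (b : Nat) :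
    pvBitI (PySem.Int.bxor x y) b
      = pvBitI x b + pvBitI y b - 2 * (pvBitI x b * pvBitI y b) := by
  have h1 : ∀ m : Nat, m / 2^b % 2 = 0 ∨ m / 2^b % 2 = 1 := by
    intro m
    have := Nat.mod_lt (m / 2^b) (show 0 < 2 by norm_num)
    omega
  rcases x with m | m <;> rcases y with n | n <;>
    simp only [bxor_nn, bxor_neg_nonneg, bxor_nonneg_neg, bxor_neg_neg,
      pvBitI_natCast, pvBitI_negSucc, pv_natbit_xor] <;>
    rcases h1 m with h | h <;> rcases h1 n with h' | h' <;> simp [h, h']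
theorem pv_gen (z : Int) (m : Nat) :
    ((List.range m).map (fun b => 2^b * pvBitI z b)).sum = z - 2^m * (z / 2^m) := by
  induction m with
  | zero => simp [pvBitI]
  | succ m ih =>
    rw [List.range_succ, List.map_append, List.sum_append, ih]
    simp only [List.map_cons, List.map_nil, List.sum_cons, List.sum_nil, add_zero]
    have hdv : z / 2^(m+1) = z / 2^m / 2 := by
      rw [pow_succ, ← Int.ediv_ediv_of_nonneg (by positivity)]
    rw [hdv]
    unfold pvBitI
    have hq := Int.ediv_add_emod (z / 2^m) 2
    linear_combination ((2:Int)^m) * hq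
theorem pv_decomp (z : Int) (h1 : -(2^32) ≤ z) (h2 : z < 2^32) :
    ((List.range 33).map (fun b => pvEff b * pvBitI z b)).sum = z := by
  have h0 : ((List.range 33).map (fun b => pvEff b * pvBitI z b)).sum
      = ((List.range 32).map (fun b => 2^b * pvBitI z b)).sum + pvEff 32 * pvBitI z 32 := by
    rw [show (33 : Nat) = 32 + 1 from rfl, List.range_succ, List.map_append, List.sum_append]
    have hmc : (List.range 32).map (fun b => pvEff b * pvBitI z b)
        = (List.range 32).map (fun b => (2:Int)^b * pvBitI z b) := by
      apply List.map_congr_left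
      intro b hb
      rw [List.mem_range] at hb
      rw [pvEff, if_neg (by omega)]
    rw [hmc]
    simp
  rw [h0, pv_gen]
  rw [pvEff, if_pos rfl]
  unfold pvBitI
  have e32 : (2:Int)^32 = 4294967296 := by norm_num
  rw [e32] at h1 h2 ⊢
  omega

-- range closure for bxor
theorem pv_bxor_range {x y : Int} (hx1 : -(2^32) ≤ x) (hx2 : x < 2^32)
    (hy1 : -(2^32) ≤ y) (hy2 : y < 2^32) :
    -(2^32) ≤ PySem.Int.bxor x y ∧ PySem.Int.bxor x y < 2^32 := by
  have eI : (2:Int)^32 = 4294967296 := by norm_num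
  have eN : (2:Nat)^32 = 4294967296 := by norm_num
  rcases x with m | m <;> rcases y with n | n <;>
    simp only [bxor_nn, bxor_neg_nonneg, bxor_nonneg_neg, bxor_neg_neg] at hx1 hx2 hy1 hy2 ⊢ <;>
    simp only [Int.ofNat_eq_natCast, Int.negSucc_eq, eI] at hx1 hx2 hy1 hy2 ⊢
  all_goals have hm : m < 2^32 := by rw [eN]; omega
  all_goals have hn : n < 2^32 := by rw [eN]; omega
  all_goals have hxor := Nat.xor_lt_two_pow hm hn
  all_goals rw [eN] at hxor
  all_goals omega
theorem pvXF_range (l : List Int) (hl : ∀ x ∈ l, -(2^32) ≤ x ∧ x < 2^32) :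
    ∀ a, -(2^32) ≤ a → a < 2^32 → -(2^32) ≤ pvXF a l ∧ pvXF a l < 2^32 := by
  induction l with
  | nil => intro a h1 h2; exact ⟨h1, h2⟩
  | cons v l ih =>
    intro a h1 h2
    have hv := hl v (by simp)
    have hb := pv_bxor_range h1 h2 hv.1 hv.2
    simp only [pvXF, List.foldl_cons]
    exact ih (fun x hx => hl x (by simp [hx])) _ hb.1 hb.2
theorem pvQ_range (xs : List Int) (hxs : ∀ x ∈ xs, -(2^32) ≤ x ∧ x < 2^32) (k : Nat) :
    -(2^32) ≤ pvQ xs k ∧ pvQ xs k < 2^32 := by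
  apply pvXF_range
  · intro x hx
    have : x ∈ xs ++ xs := List.mem_of_mem_take hx
    rcases List.mem_append.mp this with h | h
    · exact hxs x h
    · exact hxs x h
  · norm_num
  · norm_num

-- getD helpers
theorem pv_getD_map (l : List Int) (f : Int → Int) (k : Nat) (hk : k < l.length) :
    (l.map f).getD k 0 = f (l.getD k 0) := by
  rw [List.getD_eq_getElem _ _ (by simpa), List.getD_eq_getElem _ _ hk, List.getElem_map]
theorem pv_getD_map_range (g : Nat → Int) (M k : Nat) (hk : k < M) :
    ((List.range M).map g).getD k 0 = g k := by
  rw [List.getD_eq_getElem _ _ (by simpa)]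
  simp
theorem pv_getD_cons_map (h : Nat → Int) (M k : Nat) (hk : k ≤ M) (h0 : h 0 = 0) :
    (((0:Int) :: (List.range M).map (fun i => h (i+1))).getD k 0) = h k := by
  cases k with
  | zero => simp [h0]
  | succ k =>
    simp only [List.getD_cons_succ]
    rw [pv_getD_map_range _ _ _ (by omega)]

-- cumulative-sum fold characterisation
theorem pv_cum_fold (f : Nat → Int) (m : Nat) :
    ∀ (acc : List Int) (c : Int),
    (List.range m).foldl (fun (p : List Int × Int) j => (p.1 ++ [p.2 + f j], p.2 + f j)) (acc, c)
      = (acc ++ (List.range m).map (fun i => c + ((List.range (i+1)).map f).sum),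
         c + ((List.range m).map f).sum) := by
  induction m with
  | zero => intro acc c; simp
  | succ m ih =>
    intro acc c
    rw [List.range_succ, List.foldl_append, ih]
    simp only [List.foldl_cons, List.foldl_nil]
    simp [List.range_succ, List.append_assoc, add_assoc]

-- the per-bit loop body of pvBest, as a named function (identical to the lambda in pvBest)
def pvStepB (xs : List Int) (st : List Int × List Int × Int) (b : Int) : List Int × List Int × Int :=
  let totals := st.1
  let cur := st.2.1
  let w0 := st.2.2
  let w : Int := if b == 32 then -w0 else w0
  let cum : List Int := ((PySem.List.pyRange 1 (2*(xs.length : Int)+1)).foldl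
    (fun (p : List Int × Int) k =>
      (p.1 ++ [p.2 + PySem.Int.mod (PySem.List.pyGetD cur k 0) 2],
       p.2 + PySem.Int.mod (PySem.List.pyGetD cur k 0) 2)) ([0], 0)).1
  let new_totals : List Int := (PySem.List.pyRange 0 (xs.length : Int)).foldl
    (fun acc s =>
      let ones := PySem.List.pyGetD cum (s + (xs.length : Int)) 0 - PySem.List.pyGetD cum s 0
      let ones2 := if PySem.Int.mod (PySem.List.pyGetD cur s 0) 2 ≠ 0 then (xs.length : Int) - ones else ones
      acc ++ [PySem.List.pyGetD totals s 0 + w * ones2]) []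
  (new_totals, cur.map (fun z => PySem.Int.floordiv z 2), w * 2)

theorem pvBest_eq (xs : List Int) :
    pvBest xs = ((PySem.List.pyRange 0 33).foldl (pvStepB xs)
      (List.replicate xs.length (0 : Int),
       ((xs ++ xs).foldl
         (fun (p : List Int × Int) v => (p.1 ++ [PySem.Int.bxor p.2 v], PySem.Int.bxor p.2 v))
         ([0], 0)).1, 1)).1.foldl (fun best_t t => max best_t t) 0 := rfl

theorem pvT_succ (xs : List Int) (b0 s : Nat) :
    pvT xs (b0+1) s = pvT xs b0 s + pvEff b0 * pvRow xs b0 s := by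
  unfold pvT
  rw [List.range_succ, List.map_append, List.sum_append]
  simp

theorem pv_adj (xs : List Int) (b0 s : Nat) (hs : s < xs.length) :
    (if pvBitI (pvQ xs s) b0 ≠ 0 then (xs.length:Int) - (pvSc xs b0 (s+xs.length) - pvSc xs b0 s)
     else pvSc xs b0 (s+xs.length) - pvSc xs b0 s) = pvRow xs b0 s := by
  have hwin : pvSc xs b0 (s+xs.length) - pvSc xs b0 s
      = ((List.range xs.length).map (fun j => pvBitI (pvQ xs (s+(j+1))) b0)).sum := by
    unfold pvSc
    rw [List.range_add, List.map_append, List.sum_append, add_sub_cancel_left, List.map_map]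
    apply congrArg
    apply List.map_congr_left
    intro j _
    simp only [Function.comp_apply]
    have : s + j + 1 = s + (j + 1) := by omega
    rw [this]
  rcases pvBitI_cases (pvQ xs s) b0 with h | h
  · rw [h, if_neg (by simp), hwin]
    unfold pvRow
    apply congrArg
    apply List.map_congr_left
    intro j _
    unfold pvTermJ
    rw [h]
    ring
  · rw [h, if_pos (by norm_num), hwin]
    unfold pvRow
    have he : ((List.range xs.length).map (fun j => pvTermJ xs s j b0)).sum
        = ((List.range xs.length).map (fun j => (fun _ => (1:Int)) j - pvBitI (pvQ xs (s+(j+1))) b0)).sum := by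
      apply congrArg
      apply List.map_congr_left
      intro j _
      unfold pvTermJ
      rw [h]
      ring
    rw [he, pv_sum_sub, pv_sum_one]

theorem pv_step_eq (xs : List Int) (b0 : Nat) (hb : b0 ≤ 32) :
    pvStepB xs ((List.range xs.length).map (pvT xs b0),
        (pvPre 0 (xs ++ xs)).map (fun z => z / 2^b0), 2^b0) ((b0 : Nat) : Int)
      = ((List.range xs.length).map (pvT xs (b0+1)),
         (pvPre 0 (xs ++ xs)).map (fun z => z / 2^(b0+1)),
         (if b0 = 32 then -(2^b0) else (2:Int)^b0) * 2) := by
  have hQlen : (pvPre 0 (xs ++ xs)).length = 2 * xs.length + 1 := by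
    rw [pvPre_length]
    simp [List.length_append]
    omega
  have hcurD : ∀ k : Nat, k ≤ 2 * xs.length →
      List.getD ((pvPre 0 (xs ++ xs)).map (fun z => z / 2 ^ b0)) k 0 = pvQ xs k / 2 ^ b0 := by
    intro k hk
    rw [pv_getD_map _ _ _ (by omega), pvPre_getD _ _ _ (by simp [List.length_append]; omega)]
    rfl
  have e2l : (2 * (xs.length : Int) + 1) = 1 + ((2 * xs.length : Nat) : Int) := by push_cast; ring
  have hif : (((b0 : Nat) : Int) == (32:Int)) = decide (b0 = 32) := by
    by_cases h : b0 = 32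
    · subst h; simp
    · simp [h]
      omega
  simp only [pvStepB, hif]
  have hcum : ((PySem.List.pyRange 1 (2*(xs.length:Int)+1)).foldl
      (fun (p : List Int × Int) k =>
        (p.1 ++ [p.2 + PySem.Int.mod (PySem.List.pyGetD ((pvPre 0 (xs ++ xs)).map (fun z => z / 2^b0)) k 0) 2],
         p.2 + PySem.Int.mod (PySem.List.pyGetD ((pvPre 0 (xs ++ xs)).map (fun z => z / 2^b0)) k 0) 2)) ([0], 0)).1
      = (0:Int) :: (List.range (2*xs.length)).map (fun i => pvSc xs b0 (i+1)) := by
    rw [e2l, pv_pyRange_shift (2*xs.length) 1]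
    simp only [List.foldl_map]
    rw [pv_cum_fold (fun j => PySem.Int.mod (PySem.List.pyGetD ((pvPre 0 (xs ++ xs)).map (fun z => z / 2^b0)) (1 + (j:Int)) 0) 2) (2*xs.length) [0] 0]
    simp only [zero_add, List.singleton_append]
    congr 1
    apply List.map_congr_left
    intro i hi
    rw [List.mem_range] at hi
    unfold pvSc
    apply congrArg
    apply List.map_congr_left
    intro j hj
    rw [List.mem_range] at hj
    rw [show (1 + (j:Int)) = ((j+1 : Nat) : Int) from by push_cast; ring,
        PySem.List.pyGetD_natCast, hcurD (j+1) (by omega),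
        PySem.Int.mod_eq_emod_of_pos (by norm_num)]
    rfl
  rw [hcum]
  simp only [Prod.mk.injEq]
  refine ⟨?_, ?_, ?_⟩
  · -- new totals
    rw [PySem.List.pyRange_zero_natCast]
    simp only [List.foldl_map, PySem.List.foldl_append_singleton_eq_map, List.nil_append]
    apply List.map_congr_left
    intro s hsmem
    rw [List.mem_range] at hsmem
    rw [show ((s:Int) + (xs.length:Int)) = ((s + xs.length : Nat) : Int) from by push_cast; ring]
    rw [PySem.List.pyGetD_natCast, PySem.List.pyGetD_natCast, PySem.List.pyGetD_natCast,
        PySem.List.pyGetD_natCast]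
    rw [pv_getD_cons_map (pvSc xs b0) (2*xs.length) (s + xs.length) (by omega) (by simp [pvSc]),
        pv_getD_cons_map (pvSc xs b0) (2*xs.length) s (by omega) (by simp [pvSc]),
        pv_getD_map_range (pvT xs b0) xs.length s hsmem,
        hcurD s (by omega),
        PySem.Int.mod_eq_emod_of_pos (by norm_num)]
    rw [show (pvQ xs s / 2 ^ b0 % 2) = pvBitI (pvQ xs s) b0 from rfl]
    rw [pv_adj xs b0 s hsmem, pvT_succ]
    by_cases h32 : b0 = 32 <;> simp [h32, pvEff]
  · -- cur
    rw [List.map_map]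
    apply List.map_congr_left
    intro z _
    simp only [Function.comp_apply]
    rw [PySem.Int.floordiv_eq_ediv_of_pos (by norm_num), pow_succ,
        ← Int.ediv_ediv_of_nonneg (by positivity)]
  · -- weight
    by_cases h32 : b0 = 32 <;> simp [h32]

theorem pv_loopB (xs : List Int) :
    ∀ (m b0 : Nat), b0 + m = 33 →
    ∀ (w0 : Int), (0 < m → w0 = 2^b0) →
    (((List.range' b0 m).map (fun j : Nat => (j : Int))).foldl (pvStepB xs)
        ((List.range xs.length).map (pvT xs b0),
         (pvPre 0 (xs ++ xs)).map (fun z => z / 2^b0), w0)).1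
      = (List.range xs.length).map (pvT xs 33) := by
  intro m
  induction m with
  | zero =>
    intro b0 hb0 w0 _
    have : b0 = 33 := by omega
    subst this
    simp [List.range']
  | succ m ih =>
    intro b0 hb0 w0 hw
    have hw0 : w0 = 2^b0 := hw (Nat.succ_pos m)
    subst hw0
    rw [List.range'_succ, List.map_cons, List.foldl_cons, pv_step_eq xs b0 (by omega)]
    exact ih (b0+1) (by omega) _ (fun hm => by
      rw [if_neg (by omega), ← pow_succ])

theorem pvBest_char (xs : List Int) (hx : ∀ x ∈ xs, -(2^32) ≤ x ∧ x < 2^32) :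
    pvBest xs = (List.range xs.length).foldl (fun m s => max m (pvPS 0 (pvRot xs s))) 0 := by
  have hps : ∀ s, s < xs.length → pvT xs 33 s = pvPS 0 (pvRot xs s) := by
    intro s hs
    rw [pv_window xs s hs]
    unfold pvT
    have h2 : (List.range 33).map (fun b => pvEff b * pvRow xs b s)
        = (List.range 33).map (fun b => ((List.range xs.length).map
            (fun j => pvEff b * pvTermJ xs s j b)).sum) :=
      List.map_congr_left (fun b _ => by unfold pvRow; rw [pv_mul_sum])
    rw [h2, pv_sum_swap]
    apply congrArg
    apply List.map_congr_left
    intro j hj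
    rw [List.mem_range] at hj
    have h3 : (List.range 33).map (fun b => pvEff b * pvTermJ xs s j b)
        = (List.range 33).map (fun b =>
            pvEff b * pvBitI (PySem.Int.bxor (pvQ xs (s+(j+1))) (pvQ xs s)) b) :=
      List.map_congr_left (fun b _ => by rw [pvBitI_bxor]; rfl)
    rw [h3]
    have hq1 := pvQ_range xs hx (s+(j+1))
    have hq2 := pvQ_range xs hx s
    have hbx := pv_bxor_range hq1.1 hq1.2 hq2.1 hq2.2
    exact pv_decomp _ hbx.1 hbx.2
  rw [pvBest_eq,
      show (([0]:List Int), (0:Int)) = (([]:List Int) ++ [0], (0:Int)) from rfl, pvPre_build,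
      List.nil_append]
  have hrep : List.replicate xs.length (0:Int) = (List.range xs.length).map (pvT xs 0) := by
    rw [show (List.range xs.length).map (pvT xs 0)
        = (List.range xs.length).map (fun _ => (0:Int)) from
      List.map_congr_left (fun t _ => by unfold pvT; simp)]
    simp
  have hpx : pvPre 0 (xs ++ xs) = (pvPre 0 (xs ++ xs)).map (fun z => z / 2^0) := by
    rw [show (fun z : Int => z / 2^0) = id from funext (fun z => by simp)]
    simp
  rw [hrep]
  conv_lhs => rw [hpx]
  rw [show (33:Int) = ((33:Nat):Int) from by norm_num, PySem.List.pyRange_zero_natCast,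
      show (List.range 33) = List.range' 0 33 from List.range_eq_range',
      pv_loopB xs 33 0 (by omega) 1 (fun _ => by norm_num)]
  rw [List.foldl_map]
  apply PySem.List.foldl_congr_mem
  intro acc s hsmem
  rw [List.mem_range] at hsmem
  rw [hps s hsmem]

theorem pv_final (arr : List Int) (hx : ∀ x ∈ arr, -(2^32) ≤ x ∧ x < 2^32) :
    maxCyclicArr arr = maxCyclicArr_alt arr := by
  rw [pvA_char, pv_foldmax_split]
  have hxr : ∀ x ∈ arr.reverse, -(2^32) ≤ x ∧ x < 2^32 := by
    intro x hxm; exact hx x (List.mem_reverse.mp hxm)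
  simp only [maxCyclicArr_alt, pvBest_char arr hx, pvBest_char arr.reverse hxr,
    List.length_reverse]
  congr 1
  rw [← List.foldl_map]
  have h1 : (List.map (fun s => pvPS 0 (pvRot arr.reverse (arr.length - 1 - s)))
        (List.range arr.length))
      = (List.map (fun s => pvPS 0 (pvRot arr.reverse s)) (List.range arr.length)).reverse := by
    rw [← List.map_reverse, ← pv_range_rev, List.map_map]
    rfl
  rw [h1, pv_foldmax_reverse, List.foldl_map]

-- ===== VERDICT (by name: the statement is the Claim_ definition above) =====
theorem maxCyclicArr_spec : Claim_equal_maxCyclicArr := by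
  intro arr hdom
  have hx : ∀ x ∈ arr, -(2^32) ≤ x ∧ x < 2^32 := by
    intro x hxm
    have := List.all_eq_true.mp hdom x hxm
    simp only [pvDomInt, decide_eq_true_eq] at this
    constructor <;> [norm_num; norm_num] <;> omega
  exact pv_final arr hx
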